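-- pv_equiv track=rewrite | github.com/tbarabosch/apihash_to_yara | hash_functions.py | dualaccModFFF1Hash
-- ===== SOURCE A (Python) =====
-- def dualaccModFFF1Hash(inString,fName):
--     if inString is None:
--         return 0
--
--     v4, v8 = 0, 1
--     for ltr in inString:
--         v8 = (ord(ltr) + v8) % 0x0FFF1
--         v4 = (v4 + v8) % 0x0FFF1
--     return (v4 << 0x10)|v8
-- ===== SOURCE B (Python) =====
-- def dualaccModFFF1Hash(inString, fName):
--     if inString is None:
--         return 0
--     n = len(inString)
--     total = sum(ord(c) for c in inString)
--     weighted = sum((n - j) * ord(c) for j, c in enumerate(inString))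
--     v8 = (1 + total) % 0x0FFF1
--     v4 = (n + weighted) % 0x0FFF1
--     return (v4 << 0x10) | v8
-- ===== Notes on version B (the rewrite author's own statement) =====
-- stated objective: alternative
-- what changed: Replaces the sequential v8->v4 dependent loop by two independent closed-form sums (a plain sum of ords and a position-weighted sum with weight n-j), taking the modulus once at the end.
import Mathlib
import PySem

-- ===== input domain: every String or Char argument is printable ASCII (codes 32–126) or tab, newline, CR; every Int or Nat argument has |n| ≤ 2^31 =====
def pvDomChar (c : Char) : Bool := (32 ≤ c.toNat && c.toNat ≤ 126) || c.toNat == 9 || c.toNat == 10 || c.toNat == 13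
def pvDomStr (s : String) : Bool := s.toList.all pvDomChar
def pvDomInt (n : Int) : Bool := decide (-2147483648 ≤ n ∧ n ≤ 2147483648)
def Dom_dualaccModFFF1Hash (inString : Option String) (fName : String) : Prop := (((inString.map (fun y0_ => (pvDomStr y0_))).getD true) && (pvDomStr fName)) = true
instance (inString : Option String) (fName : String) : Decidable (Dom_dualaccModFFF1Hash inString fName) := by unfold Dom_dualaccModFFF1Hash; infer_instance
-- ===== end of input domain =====

-- B replaces A's sequential dual-accumulator loop by two independent closed-form sums; same cost (alternative decomposition).

-- ===== PORT A =====
def dualaccModFFF1Hash (inString : Option String) (fName : String) : Int :=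
  match inString with
  | none => 0
  | some s =>
    let p := s.toList.foldl (fun (st : Int × Int) ltr =>
      let v8 := ((ltr.toNat : Int) + st.2) % 65521
      let v4 := (st.1 + v8) % 65521
      (v4, v8)) (0, 1)
    PySem.Int.bor (p.1 <<< 16) p.2

-- ===== PORT B =====
def dualaccModFFF1Hash_alt (inString : Option String) (fName : String) : Int :=
  match inString with
  | none => 0
  | some s =>
    let l := s.toList
    let n : Int := l.length
    let total := (l.map (fun c => (c.toNat : Int))).sum
    let weighted := ((PySem.List.enumerate l).map (fun jc => (n - jc.1) * ((jc.2.toNat : Int)))).sum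
    let v8 := (1 + total) % 65521
    let v4 := (n + weighted) % 65521
    PySem.Int.bor (v4 <<< 16) v8

-- ===== PRECONDITION & SPEC =====
def Spec_dualaccModFFF1Hash (inString : Option String) (fName : String) (out : Int) : Prop := out = dualaccModFFF1Hash_alt inString fName
instance (inString : Option String) (fName : String) (out : Int) : Decidable (Spec_dualaccModFFF1Hash inString fName out) := by unfold Spec_dualaccModFFF1Hash; infer_instance

-- ===== CLAIM (what is proved, stated in full; the proofs are below) =====
def Claim_equal_dualaccModFFF1Hash : Prop := ∀ (inString : Option String) (fName : String), Dom_dualaccModFFF1Hash inString fName → Spec_dualaccModFFF1Hash inString fName (dualaccModFFF1Hash inString fName)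

-- ===== LEMMAS AND PROOFS =====

-- weighted sum with leading weight m (weight decreases along the list)
def pvWrec (m : Int) : List Char → Int
  | [] => 0
  | c :: t => m * (c.toNat : Int) + pvWrec (m - 1) t

lemma pv_enum_sum (l : List Char) : ∀ (n s : Int),
    ((PySem.List.enumerate l s).map (fun jc => (n - jc.1) * ((jc.2.toNat : Int)))).sum
      = pvWrec (n - s) l := by
  induction l with
  | nil => intro n s; simp [PySem.List.enumerate_nil, pvWrec]
  | cons c t ih =>
    intro n s
    rw [PySem.List.enumerate_cons]
    simp only [List.map_cons, List.sum_cons, pvWrec, ih n (s + 1)]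
    ring_nf

lemma pv_foldl (l : List Char) : ∀ (a b : Int),
    l.foldl (fun (st : Int × Int) ltr =>
      let v8 := ((ltr.toNat : Int) + st.2) % 65521
      let v4 := (st.1 + v8) % 65521
      (v4, v8)) (a % 65521, b % 65521)
    = ((a + (l.length : Int) * b + pvWrec (l.length : Int) l) % 65521,
       (b + (l.map (fun c => (c.toNat : Int))).sum) % 65521) := by
  induction l with
  | nil => intro a b; simp [pvWrec]
  | cons c t ih =>
    intro a b
    simp only [List.foldl_cons]
    have h8 : (((c.toNat : Int)) + b % 65521) % 65521 = ((c.toNat : Int) + b) % 65521 := by omega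
    have h4 : (a % 65521 + ((c.toNat : Int) + b) % 65521) % 65521
        = (a + (c.toNat : Int) + b) % 65521 := by omega
    rw [h8, h4]
    rw [ih (a + (c.toNat : Int) + b) ((c.toNat : Int) + b), Prod.mk.injEq]
    constructor
    · congr 1
      simp only [List.length_cons, pvWrec]
      push_cast
      ring
    · congr 1
      simp only [List.map_cons, List.sum_cons]
      ring

-- ===== VERDICT (by name: the statement is the Claim_ definition above) =====
theorem dualaccModFFF1Hash_spec : Claim_equal_dualaccModFFF1Hash := by
  intro inString fName _
  unfold Spec_dualaccModFFF1Hash dualaccModFFF1Hash dualaccModFFF1Hash_alt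
  cases inString with
  | none => rfl
  | some s =>
    simp only
    have h0 : ((0 : Int), (1 : Int)) = ((0 : Int) % 65521, (1 : Int) % 65521) := by norm_num
    rw [h0, pv_foldl s.toList 0 1, pv_enum_sum s.toList (s.toList.length : Int) 0]
    have h1 : (0 + ((s.toList.length : Int)) * 1 + pvWrec ((s.toList.length : Int)) s.toList)
        = ((s.toList.length : Int) + pvWrec ((s.toList.length : Int) - 0) s.toList) := by rw [sub_zero]; ring
    rw [h1]
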